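-- pv_equiv track=rewrite | github.com/agsosa96/Programacion-1 | Trabajo Practico N°3/Ejercicio_2_E.py | matriz_gradiente
-- ===== SOURCE A (Python) =====
-- def matriz_gradiente(matrix):
--     filas = 0
--     columnas = 0
--     contador = 1
--     for f in range(len(matrix)):
--         if(f % 2 == 0):
--             for c in range(len(matrix[0])):
--                 if(c % 2 != 0):
--                     matrix[f][c] = contador
--                     contador += 1
--         if(f % 2 != 0):
--             for c in range(len(matrix[0])):
--                 if(c % 2 == 0):
--                     matrix[f][c] = contador
--                     contador += 1
--
--     return matrix
-- ===== SOURCE B (Python) =====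
-- def matriz_gradiente(matrix):
--     cols = len(matrix[0]) if matrix else 0
--     return [
--         [(f * cols) // 2 + (c + f % 2) // 2 + 1
--          if c < cols and (f + c) % 2 == 1 else v
--          for c, v in enumerate(row)]
--         for f, row in enumerate(matrix)
--     ]
-- ===== Notes on version B (the rewrite author's own statement) =====
-- stated objective: alternative
-- what changed: B drops A's sequential counter entirely: each checkerboard cell's number is computed independently by the closed-form formula 1 + (f*cols)//2 + (c + f%2)//2, applied in a pure per-cell map that builds a fresh matrix.
import Mathlib
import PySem

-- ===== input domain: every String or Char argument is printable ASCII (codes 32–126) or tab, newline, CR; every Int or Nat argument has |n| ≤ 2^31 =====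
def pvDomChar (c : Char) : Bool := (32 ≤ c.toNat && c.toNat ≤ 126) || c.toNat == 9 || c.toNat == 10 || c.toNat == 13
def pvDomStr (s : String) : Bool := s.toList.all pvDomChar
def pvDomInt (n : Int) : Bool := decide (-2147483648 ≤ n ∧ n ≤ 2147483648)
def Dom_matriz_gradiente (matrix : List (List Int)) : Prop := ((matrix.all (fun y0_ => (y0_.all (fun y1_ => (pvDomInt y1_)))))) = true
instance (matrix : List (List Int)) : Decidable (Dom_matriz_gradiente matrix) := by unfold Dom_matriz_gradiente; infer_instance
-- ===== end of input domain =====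

-- B replaces A's threaded counter by a closed-form per-cell formula (1 + (f*cols)//2 + (c+f%2)//2)
-- applied in a pure map; equivalence is about the return value only (Python A mutates `matrix`
-- in place, B builds a fresh matrix).


-- matrix[f][c] = v  (in-range inside Pre_; Lean's set is a no-op out of range)
def pvAssign (m : List (List Int)) (f c : Nat) (v : Int) : List (List Int) :=
  m.set f ((m.getD f []).set c v)

-- ===== PORT A =====
def matriz_gradiente (matrix : List (List Int)) : List (List Int) :=
  ((List.range matrix.length).foldl
    (fun (st : List (List Int) × Int) f =>
      let st1 :=
        if f % 2 == 0 then
          (List.range ((st.1.headD []).length)).foldl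
            (fun (st : List (List Int) × Int) c =>
              if c % 2 != 0 then (pvAssign st.1 f c st.2, st.2 + 1) else st) st
        else st
      if f % 2 != 0 then
        (List.range ((st1.1.headD []).length)).foldl
          (fun (st : List (List Int) × Int) c =>
            if c % 2 == 0 then (pvAssign st.1 f c st.2, st.2 + 1) else st) st1
      else st1)
    (matrix, 1)).1

-- ===== PORT B =====
-- closed form: cell (f,c) with (f+c) odd gets 1 + (f*cols)//2 + (c + f%2)//2, others keep their value
def matriz_gradiente_alt (matrix : List (List Int)) : List (List Int) :=
  let cols : Int := if matrix.isEmpty then 0 else (matrix.headD []).length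
  (PySem.List.enumerate matrix 0).map (fun fr =>
    (PySem.List.enumerate fr.2 0).map (fun cv =>
      if cv.1 < cols && PySem.Int.mod (fr.1 + cv.1) 2 == 1 then
        PySem.Int.floordiv (fr.1 * cols) 2 + PySem.Int.floordiv (cv.1 + PySem.Int.mod fr.1 2) 2 + 1
      else cv.2))

-- ===== PRECONDITION & SPEC =====
-- Pre_ excludes exactly the jagged matrices on which Python A raises IndexError:
-- some checkerboard cell (f,c) with c < len(matrix[0]) lies beyond row f's length.
def Pre_matriz_gradiente (matrix : List (List Int)) : Prop :=
  ∀ f < matrix.length, ∀ c < (matrix.headD []).length,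
    (f + c) % 2 = 1 → c < (matrix.getD f []).length
instance (matrix : List (List Int)) : Decidable (Pre_matriz_gradiente matrix) := by
  unfold Pre_matriz_gradiente; infer_instance
def pvWitness_matriz_gradiente : List (List Int) := ([[0, 7], [3, 0], [0, -1]])

def Spec_matriz_gradiente (matrix : List (List Int)) (out : List (List Int)) : Prop := out = matriz_gradiente_alt matrix
instance (matrix : List (List Int)) (out : List (List Int)) : Decidable (Spec_matriz_gradiente matrix out) := by unfold Spec_matriz_gradiente; infer_instance

-- ===== CLAIM (what is proved, stated in full; the proofs are below) =====
def Claim_equal_matriz_gradiente : Prop := ∀ (matrix : List (List Int)), Dom_matriz_gradiente matrix → Pre_matriz_gradiente matrix → Spec_matriz_gradiente matrix (matriz_gradiente matrix)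

-- ===== LEMMAS AND PROOFS =====

-- the value B's closed form puts in checkerboard cell (f,c) (Nat formulation)
def pvVal (cols f c : Nat) : Int := 1 + ((f * cols) / 2 : Nat) + ((c + f % 2) / 2 : Nat)

-- one row after numbering: odd-parity cells below cols get their closed-form number
def pvRowUpd (cols f : Nat) (row : List Int) : List Int :=
  row.mapIdx (fun c v => if c < cols && (f + c) % 2 == 1 then pvVal cols f c else v)

-- counter-threading step over a coordinate list (A's normal form)
def pvTstep (st : List (List Int) × Int) (p : Nat × Nat) : List (List Int) × Int :=
  (pvAssign st.1 p.1 p.2 st.2, st.2 + 1)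

-- the coordinates A touches in row f
def pvRow (cols f : Nat) : List (Nat × Nat) :=
  (List.range cols).filterMap (fun c => if (f + c) % 2 == 1 then some (f, c) else none)

-- row-level counter step
def pvRstep (rk : List Int × Int) (c : Nat) : List Int × Int := (rk.1.set c rk.2, rk.2 + 1)

lemma pvAssign_shape (m : List (List Int)) (f c : Nat) (v : Int) :
    (pvAssign m f c v).map List.length = m.map List.length := by
  unfold pvAssign
  rcases Nat.lt_or_ge f m.length with h | h
  · have h' : f < (m.map List.length).length := by simpa using h
    rw [List.map_set]
    have : ((m.getD f []).set c v).length = (m.map List.length)[f] := by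
      simp [List.getD_eq_getElem?_getD, List.getElem?_eq_getElem h]
    rw [this, List.set_getElem_self h']
  · rw [List.set_eq_of_length_le (by simpa using h)]

lemma pvTstep_foldl_shape (l : List (Nat × Nat)) :
    ∀ st : List (List Int) × Int,
      (l.foldl pvTstep st).1.map List.length = st.1.map List.length := by
  induction l with
  | nil => intro st; rfl
  | cons p l ih =>
    intro st
    rw [List.foldl_cons, ih]
    exact pvAssign_shape _ _ _ _

lemma headD_len_of_shape {m m' : List (List Int)}
    (h : m.map List.length = m'.map List.length) :
    (m.headD []).length = (m'.headD []).length := by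
  cases m with
  | nil => cases m' with
    | nil => rfl
    | cons a t => simp at h
  | cons a t => cases m' with
    | nil => simp at h
    | cons b t' => simp_all

lemma filterMap_if {α β : Type} (p : α → Bool) (g : α → β) :
    ∀ l : List α,
      l.filterMap (fun c => if p c then some (g c) else none) = (l.filter p).map g := by
  intro l
  induction l with
  | nil => rfl
  | cons a l ih => by_cases h : p a <;> simp [h, ih]

lemma foldl_if_filter {α β : Type} (p : α → Bool) (g : β → α → β) (l : List α) :
    ∀ st : β, l.foldl (fun st c => if p c then g st c else st) st = (l.filter p).foldl g st := by
  induction l with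
  | nil => intro st; rfl
  | cons a l ih =>
    intro st
    by_cases h : p a <;> simp [h, ih]

-- A's body for one row f equals the threaded fold over pvRow cols f
lemma row_eq (f : Nat) (st : List (List Int) × Int) (cols : Nat)
    (hc : (st.1.headD []).length = cols) :
    (let st1 :=
        if f % 2 == 0 then
          (List.range ((st.1.headD []).length)).foldl
            (fun (st : List (List Int) × Int) c =>
              if c % 2 != 0 then (pvAssign st.1 f c st.2, st.2 + 1) else st) st
        else st
      if f % 2 != 0 then
        (List.range ((st1.1.headD []).length)).foldl
          (fun (st : List (List Int) × Int) c =>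
            if c % 2 == 0 then (pvAssign st.1 f c st.2, st.2 + 1) else st) st1
      else st1)
    = (pvRow cols f).foldl pvTstep st := by
  have hrow_even : f % 2 = 0 → pvRow cols f
      = ((List.range cols).filter (fun c => c % 2 != 0)).map (fun c => (f, c)) := by
    intro hf
    unfold pvRow
    rw [filterMap_if (fun c => (f + c) % 2 == 1) (fun c => (f, c)), List.filter_congr]
    intro c _
    rw [Bool.eq_iff_iff]
    simp only [beq_iff_eq, bne_iff_ne, ne_eq]
    omega
  have hrow_odd : f % 2 = 1 → pvRow cols f
      = ((List.range cols).filter (fun c => c % 2 == 0)).map (fun c => (f, c)) := by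
    intro hf
    unfold pvRow
    rw [filterMap_if (fun c => (f + c) % 2 == 1) (fun c => (f, c)), List.filter_congr]
    intro c _
    rw [Bool.eq_iff_iff]
    simp only [beq_iff_eq]
    omega
  rcases Nat.mod_two_eq_zero_or_one f with hf | hf
  · have h0 : (f % 2 == 0) = true := by simp [hf]
    have h1 : (f % 2 != 0) = false := by simp [hf]
    simp only [h0, h1, hc, if_true, if_false, Bool.false_eq_true]
    rw [foldl_if_filter, hrow_even hf, List.foldl_map]
    rfl
  · have h0 : (f % 2 == 0) = false := by simp [hf]
    have h1 : (f % 2 != 0) = true := by simp [hf]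
    simp only [h0, h1, hc, if_true, if_false, Bool.false_eq_true]
    rw [foldl_if_filter, hrow_odd hf, List.foldl_map]
    rfl

-- A equals the threaded fold over the concatenated coordinate lists
lemma A_to_coords (cols : Nat) (fs : List Nat) :
    ∀ (st : List (List Int) × Int), (st.1.headD []).length = cols →
    fs.foldl
      (fun (st : List (List Int) × Int) f =>
        let st1 :=
          if f % 2 == 0 then
            (List.range ((st.1.headD []).length)).foldl
              (fun (st : List (List Int) × Int) c =>
                if c % 2 != 0 then (pvAssign st.1 f c st.2, st.2 + 1) else st) st
          else st
        if f % 2 != 0 then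
          (List.range ((st1.1.headD []).length)).foldl
            (fun (st : List (List Int) × Int) c =>
              if c % 2 == 0 then (pvAssign st.1 f c st.2, st.2 + 1) else st) st1
        else st1)
      st
    = (fs.flatMap (pvRow cols)).foldl pvTstep st := by
  induction fs with
  | nil => intro st _; rfl
  | cons f fs ih =>
    intro st hc
    rw [List.foldl_cons, List.flatMap_cons, List.foldl_append, row_eq f st cols hc]
    exact ih _ (headD_len_of_shape (pvTstep_foldl_shape _ st) ▸ hc)

-- the row-level fold along the parity columns of range cols produces the closed form
lemma setrow (f : Nat) : ∀ (cols : Nat) (r : List Int) (k : Int),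
    (∀ c < cols, (f + c) % 2 = 1 → c < r.length) →
    ((List.range cols).filter (fun c => (f + c) % 2 == 1)).foldl pvRstep (r, k)
    = (r.mapIdx (fun c v => if c < cols && (f + c) % 2 == 1 then k + ((c + f % 2) / 2 : Nat) else v),
       k + ((cols + f % 2) / 2 : Nat)) := by
  intro cols
  induction cols with
  | zero =>
    intro r k _
    simp only [List.range_zero, List.filter_nil, List.foldl_nil]
    refine Prod.ext ?_ (by simp)
    apply List.ext_getElem? ; intro c
    simp [List.getElem?_mapIdx]
  | succ n ih =>
    intro r k hr
    rw [List.range_succ, List.filter_append, List.foldl_append,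
      ih r k (fun c hc => hr c (by omega))]
    by_cases hp : (f + n) % 2 = 1
    · have hn : n < r.length := hr n (by omega) hp
      have h2 : (n + f % 2) % 2 = 1 := by omega
      have hdiv : (n + 1 + f % 2) / 2 = (n + f % 2) / 2 + 1 := by omega
      simp only [List.filter_cons, List.filter_nil, hp, beq_iff_eq, if_true, List.foldl_cons,
        List.foldl_nil, pvRstep]
      refine Prod.ext ?_ ?_
      · apply List.ext_getElem? ; intro c
        rcases Nat.lt_or_ge c r.length with hcr | hcr
        · rw [List.getElem?_set]
          by_cases hcn : n = c
          · subst hcn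
            simp [List.getElem?_mapIdx, List.getElem?_eq_getElem hcr, hp, hn, Nat.lt_succ_self,
              Nat.lt_irrefl]
          · simp only [hcn, if_false, List.getElem?_mapIdx, List.getElem?_eq_getElem hcr,
              Option.map_some]
            congr 1
            have hne : (decide (c < n + 1)) = decide (c < n) := by
              by_cases h : c < n <;> simp [h] <;> omega
            rw [hne]
        · rw [List.getElem?_set, if_neg (by omega : ¬ n = c)]
          simp [List.getElem?_mapIdx, List.getElem?_eq_none_iff.mpr (by simpa using hcr)]
      · simp only [Prod.snd, hdiv]
        push_cast
        ring
    · have h2 : (n + f % 2) % 2 = 0 := by omega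
      have hdiv : (n + 1 + f % 2) / 2 = (n + f % 2) / 2 := by omega
      simp only [List.filter_cons, List.filter_nil, hp, beq_iff_eq, if_false, List.foldl_nil,
        List.append_nil]
      refine Prod.ext ?_ ?_
      · apply List.ext_getElem? ; intro c
        simp only [List.getElem?_mapIdx]
        rcases Nat.lt_or_ge c r.length with hcr | hcr
        · simp only [List.getElem?_eq_getElem hcr, Option.map_some]
          congr 1
          by_cases hpar : (f + c) % 2 = 1
          · have hcn : c ≠ n := fun h => hp (h ▸ hpar)
            by_cases hlt : c < n
            · have h1 : c < n + 1 := by omega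
              simp [hlt, h1]
            · have h1 : ¬ c < n + 1 := by omega
              simp [hlt, h1]
          · have hb : ((f + c) % 2 == 1) = false := by simpa using hpar
            simp [hb]
        · simp [List.getElem?_eq_none_iff.mpr (by simpa using hcr)]
      · simp only [Prod.snd, hdiv]

-- lifting: a fold of assignments all in row f is a row-level fold plus one set
lemma mlift (f : Nat) : ∀ (cs : List Nat) (m : List (List Int)) (k : Int), f < m.length →
    cs.foldl (fun st c => pvTstep st (f, c)) (m, k)
    = ((m.set f (cs.foldl pvRstep (m.getD f [], k)).1),
       (cs.foldl pvRstep (m.getD f [], k)).2) := by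
  intro cs
  induction cs with
  | nil =>
    intro m k hf
    simp only [List.foldl_nil]
    rw [List.getD_eq_getElem?_getD, List.getElem?_eq_getElem hf]
    simp [List.set_getElem_self hf]
  | cons c cs ih =>
    intro m k hf
    rw [List.foldl_cons, List.foldl_cons]
    have hstep : pvTstep (m, k) (f, c) = (m.set f ((m.getD f []).set c k), k + 1) := rfl
    rw [hstep, ih _ _ (by simpa using hf)]
    have hget : ((m.set f ((m.getD f []).set c k)).getD f []) = (m.getD f []).set c k := by
      simp [List.getD_eq_getElem?_getD, List.getElem?_set_self' ,
        List.getElem?_eq_getElem hf]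
    rw [hget, List.set_set]
    rfl

-- telescoping of the closed-form row offsets
lemma tel (f cols : Nat) : (f * cols) / 2 + (cols + f % 2) / 2 = ((f + 1) * cols) / 2 := by
  have hm : (f * cols) % 2 = f % 2 * (cols % 2) % 2 := by
    conv_lhs => rw [Nat.mul_mod]
  rcases Nat.mod_two_eq_zero_or_one f with hf | hf <;>
    rcases Nat.mod_two_eq_zero_or_one cols with hc | hc <;>
    · rw [hf, hc] at hm
      have : (f + 1) * cols = f * cols + cols := by ring
      rw [this]
      omega

-- MAIN: the whole coordinate fold produces the closed-form matrix
lemma main_rows (cols : Nat) : ∀ (n f0 : Nat) (m : List (List Int)),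
    (∀ f, f0 ≤ f → f < f0 + n → f < m.length ∧
       ∀ c < cols, (f + c) % 2 = 1 → c < (m.getD f []).length) →
    ((List.range' f0 n).flatMap (pvRow cols)).foldl pvTstep
        (m, ((1 : Int) + (((f0 * cols) / 2 : Nat) : Int)))
    = (m.mapIdx (fun f row => if f0 ≤ f && f < f0 + n then pvRowUpd cols f row else row),
       ((1 : Int) + ((((f0 + n) * cols) / 2 : Nat) : Int))) := by
  intro n
  induction n with
  | zero =>
    intro f0 m _
    simp only [List.range'_zero, List.flatMap_nil, List.foldl_nil, Nat.add_zero]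
    refine Prod.ext ?_ rfl
    apply List.ext_getElem? ; intro i
    simp only [List.getElem?_mapIdx]
    rcases Nat.lt_or_ge i m.length with h | h
    · have hfalse : (decide (f0 ≤ i) && decide (i < f0 + 0)) = false := by
        by_cases hle : f0 ≤ i <;> simp [hle] <;> omega
      simp [List.getElem?_eq_getElem h, hfalse]
    · simp [List.getElem?_eq_none_iff.mpr (by simpa using h)]
  | succ n ih =>
    intro f0 m hm
    have hf0 : f0 < m.length := (hm f0 le_rfl (by omega)).1
    rw [List.range'_succ, List.flatMap_cons, List.foldl_append]
    have hrow : pvRow cols f0 = ((List.range cols).filter (fun c => (f0 + c) % 2 == 1)).map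
        (fun c => (f0, c)) := by
      unfold pvRow
      exact filterMap_if _ _ _
    rw [hrow, List.foldl_map,
      mlift f0 _ m _ hf0,
      setrow f0 cols (m.getD f0 []) _ (fun c hc hp => (hm f0 le_rfl (by omega)).2 c hc hp)]
    have hcnt : (1 + ((f0 * cols) / 2 : Nat) : Int) + ((cols + f0 % 2) / 2 : Nat)
        = 1 + (((f0 + 1) * cols) / 2 : Nat) := by
      rw [← tel f0 cols]; push_cast; ring
    simp only [hcnt]
    set m' := m.set f0 ((m.getD f0 []).mapIdx
      (fun c v => if c < cols && (f0 + c) % 2 == 1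
        then (1 + ((f0 * cols) / 2 : Nat) : Int) + ((c + f0 % 2) / 2 : Nat) else v)) with hm'
    have hlen' : m'.length = m.length := by simp [hm']
    have hget' : ∀ f, f ≠ f0 → m'.getD f [] = m.getD f [] := by
      intro f hf
      simp [hm', List.getD_eq_getElem?_getD, List.getElem?_set_ne (fun h => hf h.symm)]
    have := ih (f0 + 1) m' (by
      intro f h1 h2
      refine ⟨by rw [hlen']; exact (hm f (by omega) (by omega)).1, ?_⟩
      rw [hget' f (by omega)]
      exact (hm f (by omega) (by omega)).2)
    rw [this]
    refine Prod.ext ?_ ?_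
    · apply List.ext_getElem? ; intro i
      simp only [List.getElem?_mapIdx, hm', List.getElem?_set]
      by_cases hi : f0 = i
      · subst hi
        rw [if_pos rfl, if_pos hf0]
        simp only [Option.map_some, List.getElem?_eq_getElem hf0]
        have h1 : (decide (f0 + 1 ≤ f0)) = false := by simp
        have h2 : (decide (f0 ≤ f0)) = true := by simp
        have h3 : (decide (f0 < f0 + (n + 1))) = true := by simp
        rw [h1, h2, h3]
        simp only [Bool.false_and, Bool.true_and, if_false, if_true, Bool.false_eq_true]
        unfold pvRowUpd pvVal
        rw [show (m.getD f0 []) = m[f0] from by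
          simp [List.getD_eq_getElem?_getD, List.getElem?_eq_getElem hf0]]
      · rw [if_neg hi]
        rcases Nat.lt_or_ge i m.length with h | h
        · simp only [List.getElem?_eq_getElem h, Option.map_some]
          congr 1
          simp only [show (f0 + 1 ≤ i) ↔ (f0 ≤ i) from by omega,
            show (i < f0 + 1 + n) ↔ (i < f0 + (n + 1)) from by omega]
        · simp [List.getElem?_eq_none_iff.mpr (by simpa using h)]
    · have he : f0 + 1 + n = f0 + (n + 1) := by omega
      rw [he]

-- mapIdx over the full range condition simplifies away
lemma mapIdx_full (cols : Nat) (m : List (List Int)) :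
    m.mapIdx (fun f row => if 0 ≤ f && f < 0 + m.length then pvRowUpd cols f row else row)
    = m.mapIdx (pvRowUpd cols) := by
  apply List.ext_getElem? ; intro i
  simp only [List.getElem?_mapIdx]
  rcases Nat.lt_or_ge i m.length with h | h
  · simp [List.getElem?_eq_getElem h, h]
  · simp [List.getElem?_eq_none_iff.mpr (by simpa using h)]

-- pointwise-equal index functions give equal mapIdx results
lemma pv_mapIdx_congr {α β : Type} (f g : Nat → α → β) (l : List α)
    (h : ∀ i a, f i a = g i a) : l.mapIdx f = l.mapIdx g := by
  have : f = g := funext fun i => funext (h i)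
  rw [this]

-- mapping over PySem.List.enumerate is a mapIdx with a cast index
lemma enum_map {α β : Type} (g : Int × α → β) : ∀ (l : List α) (s : Int),
    (PySem.List.enumerate l s).map g = l.mapIdx (fun i v => g (s + i, v)) := by
  intro l
  induction l with
  | nil => intro s; simp [PySem.List.enumerate_nil]
  | cons x xs ih =>
    intro s
    rw [PySem.List.enumerate_cons, List.map_cons, ih, List.mapIdx_cons]
    congr 1
    · simp
    · apply pv_mapIdx_congr
      intro i v
      have he : (s + 1 + (i : Int)) = s + (((i + 1 : Nat)) : Int) := by push_cast; ring
      rw [he]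

-- B's port equals the same closed form
lemma B_eq (m : List (List Int)) :
    matriz_gradiente_alt m = m.mapIdx (pvRowUpd ((m.headD []).length)) := by
  unfold matriz_gradiente_alt
  cases m with
  | nil => rfl
  | cons r t =>
    simp only [List.isEmpty_cons, if_false, Bool.false_eq_true, List.headD_cons]
    rw [enum_map]
    apply pv_mapIdx_congr
    intro f row
    rw [enum_map]
    apply pv_mapIdx_congr
    intro c v
    dsimp only
    unfold pvVal
    have e1 : ((0 : Int) + f + ((0 : Int) + c)) = ((f + c : Nat) : Int) := by push_cast; ring
    have e2 : ((0 : Int) + f) = ((f : Nat) : Int) := by push_cast; ring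
    have hmod : PySem.Int.mod (((f + c : Nat)) : Int) 2 = (((f + c) % 2 : Nat) : Int) := by
      exact_mod_cast PySem.Int.mod_natCast (f + c) 2
    have hfm : PySem.Int.mod ((f : Nat) : Int) 2 = ((f % 2 : Nat) : Int) := by
      exact_mod_cast PySem.Int.mod_natCast f 2
    have hcond : (decide (((0 : Int) + c) < (r.length : Int))
        && (PySem.Int.mod ((0 : Int) + f + ((0 : Int) + c)) 2 == 1))
        = (decide (c < r.length) && ((f + c) % 2 == 1)) := by
      rw [e1, hmod]
      congr 1
      · simp only [zero_add, decide_eq_decide]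
        exact_mod_cast Iff.rfl
      · rcases Nat.mod_two_eq_zero_or_one (f + c) with h | h <;> simp [h]
    rw [hcond]
    by_cases hb : (decide (c < r.length) && ((f + c) % 2 == 1)) = true
    · rw [if_pos hb, if_pos hb]
      have hd1 : PySem.Int.floordiv (((f * r.length : Nat)) : Int) 2
          = (((f * r.length) / 2 : Nat) : Int) := by
        exact_mod_cast PySem.Int.floordiv_natCast (f * r.length) 2
      have hd2 : PySem.Int.floordiv (((c + f % 2 : Nat)) : Int) 2
          = (((c + f % 2) / 2 : Nat) : Int) := by
        exact_mod_cast PySem.Int.floordiv_natCast (c + f % 2) 2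
      rw [show ((0 : Int) + f) * (r.length : Int) = ((f * r.length : Nat) : Int) by push_cast; ring,
        hd1, e2, hfm,
        show ((0 : Int) + c + ((f % 2 : Nat) : Int)) = ((c + f % 2 : Nat) : Int) by push_cast; ring,
        hd2]
      push_cast
      ring
    · rw [if_neg hb, if_neg hb]

-- ===== VERDICT (by name: the statement is the Claim_ definition above) =====
theorem matriz_gradiente_spec : Claim_equal_matriz_gradiente := by
  intro matrix _ hpre
  unfold Spec_matriz_gradiente
  rw [B_eq]
  cases matrix with
  | nil => rfl
  | cons r t =>
    unfold matriz_gradiente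
    rw [A_to_coords ((r :: t).headD []).length (List.range (r :: t).length) (r :: t, 1) rfl,
      show (List.range (r :: t).length) = List.range' 0 (r :: t).length by
        rw [List.range_eq_range'],
      show ((1 : Int)) = 1 + (((0 * ((r :: t).headD []).length) / 2 : Nat) : Int) by norm_num,
      main_rows _ _ 0 _ (by
        intro f h1 h2
        exact ⟨by omega, fun c hc hp => hpre f (by omega) c hc hp⟩)]
    simp only [Prod.fst]
    exact mapIdx_full _ _
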